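-- pv_equiv track=rewrite | github.com/codingMMax/nl-dpe-fpl | fc_verification/results/plot_dimm_expanded.py | nl_group
-- ===== SOURCE A (Python) =====
-- def nl_group(bd):
--     return {
--         "Crossbar (VMM)":   sum(v for k, v in bd.items() if "vmm" in k and not k.startswith("_")),
--         "ACAM (exp/log)":   sum(v for k, v in bd.items() if "digital" in k and not k.startswith("_")),
--         "CLB (add+reduce)": sum(v for k, v in bd.items() if "clb" in k),
--         "DSP (MAC)":        bd.get("dsp_gemm", 0) + bd.get("mul", 0),
--         "BRAM R/W":         bd.get("sram_read", 0) + bd.get("sram_write", 0),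
--     }
-- ===== SOURCE B (Python) =====
-- def nl_group(bd):
--     vmm = acam = clb = dsp = bram = 0
--     for k, v in bd.items():
--         under = k.startswith("_")
--         if "vmm" in k and not under:
--             vmm += v
--         if "digital" in k and not under:
--             acam += v
--         if "clb" in k:
--             clb += v
--         if k in ("dsp_gemm", "mul"):
--             dsp += v
--         if k in ("sram_read", "sram_write"):
--             bram += v
--     return {
--         "Crossbar (VMM)": vmm,
--         "ACAM (exp/log)": acam,
--         "CLB (add+reduce)": clb,
--         "DSP (MAC)": dsp,
--         "BRAM R/W": bram,
--     }
-- ===== Notes on version B (the rewrite author's own statement) =====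
-- stated objective: alternative
-- what changed: Replaces A's three independent comprehension scans plus four .get lookups (seven passes/probes over the dict) with one single pass that maintains five running counters and assembles the result dict at the end.
import Mathlib
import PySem

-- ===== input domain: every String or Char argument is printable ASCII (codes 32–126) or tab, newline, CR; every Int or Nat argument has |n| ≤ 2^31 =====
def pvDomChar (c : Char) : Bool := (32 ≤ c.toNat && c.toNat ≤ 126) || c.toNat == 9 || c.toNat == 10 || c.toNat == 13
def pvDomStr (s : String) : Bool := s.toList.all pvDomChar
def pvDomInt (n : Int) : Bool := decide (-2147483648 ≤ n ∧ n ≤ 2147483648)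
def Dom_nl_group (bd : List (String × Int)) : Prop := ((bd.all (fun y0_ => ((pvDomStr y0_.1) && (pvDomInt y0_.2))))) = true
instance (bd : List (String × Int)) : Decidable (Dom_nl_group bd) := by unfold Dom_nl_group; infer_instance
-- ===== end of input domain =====

-- B replaces A's three separate comprehension scans plus four .get lookups by ONE pass over the
-- items maintaining five running counters (alternative decomposition, same asymptotic cost).

-- ===== PORT A =====
-- sum(v for k, v in bd.items() if p(k))
def pvSumIf (bd : List (String × Int)) (p : String → Bool) : Int :=
  bd.foldl (fun acc kv => if p kv.1 then acc + kv.2 else acc) 0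

-- bd.get(key, 0): first match in the association list, else 0
def pvGet0 (bd : List (String × Int)) (key : String) : Int :=
  match bd.find? (fun kv => kv.1 == key) with
  | some kv => kv.2
  | none => 0

def nl_group (bd : List (String × Int)) : List (String × Int) :=
  [("Crossbar (VMM)",
      pvSumIf bd (fun k => PySem.Str.isIn "vmm" k && !(PySem.Str.startswith k "_"))),
   ("ACAM (exp/log)",
      pvSumIf bd (fun k => PySem.Str.isIn "digital" k && !(PySem.Str.startswith k "_"))),
   ("CLB (add+reduce)",
      pvSumIf bd (fun k => PySem.Str.isIn "clb" k)),
   ("DSP (MAC)", pvGet0 bd "dsp_gemm" + pvGet0 bd "mul"),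
   ("BRAM R/W", pvGet0 bd "sram_read" + pvGet0 bd "sram_write")]

-- ===== PORT B =====
-- the single-pass loop body of Source B: five counters updated per item
def pvStep (acc : Int × Int × Int × Int × Int) (kv : String × Int) :
    Int × Int × Int × Int × Int :=
  let k := kv.1
  let v := kv.2
  let under := PySem.Str.startswith k "_"
  ((if PySem.Str.isIn "vmm" k && !under then acc.1 + v else acc.1),
   (if PySem.Str.isIn "digital" k && !under then acc.2.1 + v else acc.2.1),
   (if PySem.Str.isIn "clb" k then acc.2.2.1 + v else acc.2.2.1),
   (if k == "dsp_gemm" || k == "mul" then acc.2.2.2.1 + v else acc.2.2.2.1),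
   (if k == "sram_read" || k == "sram_write" then acc.2.2.2.2 + v else acc.2.2.2.2))

def nl_group_alt (bd : List (String × Int)) : List (String × Int) :=
  let r := bd.foldl pvStep (0, 0, 0, 0, 0)
  [("Crossbar (VMM)", r.1),
   ("ACAM (exp/log)", r.2.1),
   ("CLB (add+reduce)", r.2.2.1),
   ("DSP (MAC)", r.2.2.2.1),
   ("BRAM R/W", r.2.2.2.2)]

-- ===== PRECONDITION & SPEC =====
-- Pre_ excludes association lists with duplicate keys: such an input cannot arise from the Python
-- dict the function receives, and on it the list reading of bd.get (first match) versus a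
-- full-pass sum is a defensible-corner ambiguity with no canonical value.
def Pre_nl_group (bd : List (String × Int)) : Prop := (bd.map Prod.fst).Nodup
instance (bd : List (String × Int)) : Decidable (Pre_nl_group bd) := by unfold Pre_nl_group; infer_instance
def pvWitness_nl_group : (List (String × Int)) := [("vmm_core", 3), ("mul", 2), ("_vmm", 5)]

def Spec_nl_group (bd : List (String × Int)) (out : List (String × Int)) : Prop := out = nl_group_alt bd
instance (bd : List (String × Int)) (out : List (String × Int)) : Decidable (Spec_nl_group bd out) := by unfold Spec_nl_group; infer_instance

-- ===== CLAIM (what is proved, stated in full; the proofs are below) =====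
def Claim_equal_nl_group : Prop := ∀ (bd : List (String × Int)), Dom_nl_group bd → Pre_nl_group bd → Spec_nl_group bd (nl_group bd)

-- ===== LEMMAS AND PROOFS =====

-- pvSumIf as a fold from an arbitrary start adds the start
theorem pvSumIf_init (bd : List (String × Int)) (p : String → Bool) (x : Int) :
    bd.foldl (fun acc kv => if p kv.1 then acc + kv.2 else acc) x = x + pvSumIf bd p := by
  induction bd generalizing x with
  | nil => simp [pvSumIf]
  | cons kv t ih =>
    simp only [pvSumIf, List.foldl_cons]
    rw [ih, ih (if p kv.1 then 0 + kv.2 else 0)]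
    split_ifs <;> omega

theorem pvSumIf_cons (kv : String × Int) (t : List (String × Int)) (p : String → Bool) :
    pvSumIf (kv :: t) p = (if p kv.1 then kv.2 else 0) + pvSumIf t p := by
  rw [show pvSumIf (kv :: t) p
        = t.foldl (fun acc kv => if p kv.1 then acc + kv.2 else acc)
            (if p kv.1 then 0 + kv.2 else 0) from rfl,
      pvSumIf_init]
  split_ifs <;> omega

-- if a key is absent, the filtered sum over exactly that key is 0
theorem pvSumIf_eq_zero_of_not_mem (bd : List (String × Int)) (key : String)
    (h : key ∉ bd.map Prod.fst) : pvSumIf bd (fun k => k == key) = 0 := by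
  induction bd with
  | nil => simp [pvSumIf]
  | cons kv t ih =>
    simp only [List.map_cons, List.mem_cons] at h
    push Not at h
    rw [pvSumIf_cons, ih h.2]
    simp [show ¬ (kv.1 == key) = true by simp [h.1.symm]]

-- under Nodup keys, bd.get(key, 0) equals the sum of values at that key
theorem pvGet0_eq_sum (bd : List (String × Int)) (key : String)
    (h : (bd.map Prod.fst).Nodup) : pvGet0 bd key = pvSumIf bd (fun k => k == key) := by
  induction bd with
  | nil => simp [pvGet0, pvSumIf]
  | cons kv t ih =>
    simp only [List.map_cons, List.nodup_cons] at h
    rw [pvSumIf_cons]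
    by_cases hk : kv.1 = key
    · subst hk
      rw [pvSumIf_eq_zero_of_not_mem t kv.1 h.1]
      simp [pvGet0]
    · have : pvGet0 (kv :: t) key = pvGet0 t key := by
        simp [pvGet0, List.find?, show ¬ (kv.1 == key) = true by simp [hk]]
      rw [this, ih h.2]
      simp [show ¬ (kv.1 == key) = true by simp [hk]]

-- a disjoint 'or' predicate sum splits
theorem pvSumIf_or (bd : List (String × Int)) (p q : String → Bool)
    (hpq : ∀ k, ¬ (p k = true ∧ q k = true)) :
    pvSumIf bd (fun k => p k || q k) = pvSumIf bd p + pvSumIf bd q := by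
  induction bd with
  | nil => simp [pvSumIf]
  | cons kv t ih =>
    rw [pvSumIf_cons, pvSumIf_cons, pvSumIf_cons, ih]
    have := hpq kv.1
    by_cases hp : p kv.1 = true <;> by_cases hq : q kv.1 = true <;>
      simp [hp, hq] at this ⊢ <;> omega

-- the single-pass fold computes the five filtered sums at once
theorem pvFold_eq (bd : List (String × Int)) (a b c d e : Int) :
    bd.foldl pvStep (a, b, c, d, e) =
      (a + pvSumIf bd (fun k => PySem.Str.isIn "vmm" k && !(PySem.Str.startswith k "_")),
       b + pvSumIf bd (fun k => PySem.Str.isIn "digital" k && !(PySem.Str.startswith k "_")),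
       c + pvSumIf bd (fun k => PySem.Str.isIn "clb" k),
       d + pvSumIf bd (fun k => k == "dsp_gemm" || k == "mul"),
       e + pvSumIf bd (fun k => k == "sram_read" || k == "sram_write")) := by
  induction bd generalizing a b c d e with
  | nil => simp [pvSumIf]
  | cons kv t ih =>
    simp only [List.foldl_cons, pvStep]
    rw [ih]
    rw [pvSumIf_cons, pvSumIf_cons, pvSumIf_cons, pvSumIf_cons, pvSumIf_cons]
    split_ifs <;> simp <;> omega

-- ===== VERDICT (by name: the statement is the Claim_ definition above) =====
theorem nl_group_spec : Claim_equal_nl_group := by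
  intro bd _ hpre
  unfold Spec_nl_group nl_group nl_group_alt
  rw [pvFold_eq]
  have hd : ∀ k : String, ¬ ((k == "dsp_gemm") = true ∧ (k == "mul") = true) := by
    intro k ⟨h1, h2⟩
    simp at h1 h2; rw [h1] at h2; exact absurd h2 (by decide)
  have hs : ∀ k : String, ¬ ((k == "sram_read") = true ∧ (k == "sram_write") = true) := by
    intro k ⟨h1, h2⟩
    simp at h1 h2; rw [h1] at h2; exact absurd h2 (by decide)
  rw [pvSumIf_or bd _ _ hd, pvSumIf_or bd _ _ hs,
      pvGet0_eq_sum bd "dsp_gemm" hpre, pvGet0_eq_sum bd "mul" hpre,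
      pvGet0_eq_sum bd "sram_read" hpre, pvGet0_eq_sum bd "sram_write" hpre]
  simp
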